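-- pv_equiv track=rewrite | github.com/dylan-murray/sigil | sigil/core/utils.py | _extract_anchors
-- ===== SOURCE A (Python) =====
-- def _extract_anchors(old_lines: list[str]) -> list[str]:
--     anchors = []
--     for line in old_lines:
--         stripped = line.strip()
--         if len(stripped) >= 6 and not stripped.startswith("#"):
--             anchors.append(stripped)
--             if len(anchors) >= 3:
--                 break
--     for line in reversed(old_lines):
--         stripped = line.strip()
--         if len(stripped) >= 6 and not stripped.startswith("#"):
--             if stripped not in anchors:
--                 anchors.append(stripped)
--                 break
--     return anchors
-- ===== SOURCE B (Python) =====
-- def _extract_anchors(old_lines: list[str]) -> list[str]: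
--     valids = [s for s in (line.strip() for line in old_lines)
--               if len(s) >= 6 and not s.startswith("#")]
--     anchors = valids[:3]
--     for s in reversed(valids):
--         if s not in anchors:
--             anchors.append(s)
--             break
--     return anchors
-- ===== Notes on version B (the rewrite author's own statement) =====
-- stated objective: simpler
-- what changed: B materializes the filtered stripped lines once, takes the first three as a slice, and searches the reversed filtered list for the tail anchor, instead of A's two separate directional scans over the raw lines with an inline counter/break.
import Mathlib
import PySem

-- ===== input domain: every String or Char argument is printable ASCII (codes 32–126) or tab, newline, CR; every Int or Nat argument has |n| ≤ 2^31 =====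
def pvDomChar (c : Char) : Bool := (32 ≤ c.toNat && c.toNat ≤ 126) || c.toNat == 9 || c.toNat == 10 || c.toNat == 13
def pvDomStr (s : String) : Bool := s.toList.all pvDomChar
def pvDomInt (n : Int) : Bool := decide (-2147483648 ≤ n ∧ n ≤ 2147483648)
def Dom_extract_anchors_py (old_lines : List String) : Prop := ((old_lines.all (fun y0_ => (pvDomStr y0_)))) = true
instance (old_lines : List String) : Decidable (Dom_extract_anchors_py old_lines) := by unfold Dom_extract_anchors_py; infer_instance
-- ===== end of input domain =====

-- B builds the filtered stripped-line list once, slices its first three and reverse-scans it,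
-- instead of A's two directional scans over the raw lines (objective: simpler).

-- ===== PORT A =====
-- the shared validity test 'len(stripped) >= 6 and not stripped.startswith("#")'
def pvValid (s : String) : Bool :=
  decide (6 ≤ PySem.Str.len s) && !(PySem.Str.startswith s "#")

-- A's first loop: collect stripped valid lines, break once three are gathered
def pvA_loop1 : List String → List String → List String
  | [], anchors => anchors
  | line :: rest, anchors =>
    let stripped := PySem.Str.strip line
    if pvValid stripped then
      let anchors' := anchors ++ [stripped]
      if 3 ≤ anchors'.length then anchors' else pvA_loop1 rest anchors'
    else pvA_loop1 rest anchors

-- A's second loop over reversed(old_lines): append the first valid stripped line not already present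
def pvA_loop2 : List String → List String → List String
  | [], anchors => anchors
  | line :: rest, anchors =>
    let stripped := PySem.Str.strip line
    if pvValid stripped && !(anchors.contains stripped) then anchors ++ [stripped]
    else pvA_loop2 rest anchors

def extract_anchors_py (old_lines : List String) : List String :=
  pvA_loop2 old_lines.reverse (pvA_loop1 old_lines [])

-- ===== PORT B =====
-- B's tail search over reversed(valids): append the first element not in anchors
def pvB_loop : List String → List String → List String
  | [], anchors => anchors
  | s :: rest, anchors =>
    if !(anchors.contains s) then anchors ++ [s] else pvB_loop rest anchors

def extract_anchors_py_alt (old_lines : List String) : List String :=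
  let valids := (old_lines.map PySem.Str.strip).filter pvValid
  pvB_loop valids.reverse (valids.take 3)

-- ===== PRECONDITION & SPEC =====
def Spec_extract_anchors_py (old_lines : List String) (out : List String) : Prop := out = extract_anchors_py_alt old_lines
instance (old_lines : List String) (out : List String) : Decidable (Spec_extract_anchors_py old_lines out) := by unfold Spec_extract_anchors_py; infer_instance

-- ===== CLAIM (what is proved, stated in full; the proofs are below) =====
def Claim_equal_extract_anchors_py : Prop := ∀ (old_lines : List String), Dom_extract_anchors_py old_lines → Spec_extract_anchors_py old_lines (extract_anchors_py old_lines)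

-- ===== LEMMAS AND PROOFS =====

-- the filtered stripped list both halves of B share
def pvValids (ls : List String) : List String := (ls.map PySem.Str.strip).filter pvValid

lemma pvA_loop1_eq (ls : List String) : ∀ (acc : List String), acc.length < 3 →
    pvA_loop1 ls acc = acc ++ (pvValids ls).take (3 - acc.length) := by
  induction ls with
  | nil => intro acc _; simp [pvA_loop1, pvValids]
  | cons l rest ih =>
    intro acc hlt
    simp only [pvA_loop1, pvValids, List.map_cons]
    by_cases hv : pvValid (PySem.Str.strip l)
    · simp only [hv, if_pos, List.filter_cons_of_pos hv]
      by_cases h3 : 3 ≤ (acc ++ [PySem.Str.strip l]).length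
      · simp only [h3, if_pos]
        have : acc.length = 2 := by simp at h3; omega
        have h1 : 3 - acc.length = 1 := by omega
        simp [h1]
      · simp only [h3, if_neg, not_false_iff]
        rw [ih _ (by simp at h3 ⊢; omega)]
        have : 3 - acc.length = (3 - (acc ++ [PySem.Str.strip l]).length) + 1 := by
          simp at h3 ⊢; omega
        simp only [this, List.take_succ_cons, List.append_assoc, List.length_append]
        simp [pvValids]
    · simp only [hv, List.filter_cons_of_neg hv]
      exact ih acc hlt

lemma pvA_loop2_eq (ls : List String) : ∀ (acc : List String),
    pvA_loop2 ls acc = pvB_loop ((ls.map PySem.Str.strip).filter pvValid) acc := by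
  induction ls with
  | nil => intro acc; simp [pvA_loop2, pvB_loop]
  | cons l rest ih =>
    intro acc
    simp only [pvA_loop2, List.map_cons]
    by_cases hv : pvValid (PySem.Str.strip l)
    · rw [List.filter_cons_of_pos hv]
      simp only [pvB_loop, hv, Bool.true_and]
      by_cases hc : PySem.Str.strip l ∈ acc
      · simp [hc, ih]
      · simp [hc]
    · rw [List.filter_cons_of_neg hv]
      simp only [hv, Bool.false_and, if_neg, Bool.false_eq_true, not_false_iff]
      exact ih acc

-- ===== VERDICT (by name: the statement is the Claim_ definition above) =====
theorem extract_anchors_py_spec : Claim_equal_extract_anchors_py := by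
  intro old_lines _
  unfold Spec_extract_anchors_py extract_anchors_py extract_anchors_py_alt
  rw [pvA_loop1_eq old_lines [] (by simp), pvA_loop2_eq]
  simp [pvValids, List.filter_map]
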